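-- pv_equiv track=rewrite | github.com/drot27-max/2025A-TP2 | Exercice5.py | calculer_tendance
-- ===== SOURCE A (Python) =====
-- def calculer_tendance(historique_scores):
--     if len(historique_scores) < 2:
--         return 'stable'
--
--     valeurs = [score for _, score in historique_scores]
--     if all(valeurs[i] < valeurs[i+1] for i in range(len(valeurs)-1)):
--         return 'amélioration'
--     elif all(valeurs[i] > valeurs[i+1] for i in range(len(valeurs)-1)):
--         return 'dégradation'
--     else:
--         return 'stable'
-- ===== SOURCE B (Python) =====
-- def calculer_tendance(historique_scores):
--     if len(historique_scores) < 2: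
--         return 'stable'
--     valeurs = [score for _, score in historique_scores]
--     tri = sorted(set(valeurs))
--     if valeurs == tri:
--         return 'amélioration'
--     if valeurs == tri[::-1]:
--         return 'dégradation'
--     return 'stable'
-- ===== Notes on version B (the rewrite author's own statement) =====
-- stated objective: alternative
-- what changed: Replaced A's two adjacent-pair all() scans by a sort-based characterisation: the history is strictly improving iff the value list equals sorted(set(values)), strictly degrading iff it equals that sorted list reversed.
import Mathlib
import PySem

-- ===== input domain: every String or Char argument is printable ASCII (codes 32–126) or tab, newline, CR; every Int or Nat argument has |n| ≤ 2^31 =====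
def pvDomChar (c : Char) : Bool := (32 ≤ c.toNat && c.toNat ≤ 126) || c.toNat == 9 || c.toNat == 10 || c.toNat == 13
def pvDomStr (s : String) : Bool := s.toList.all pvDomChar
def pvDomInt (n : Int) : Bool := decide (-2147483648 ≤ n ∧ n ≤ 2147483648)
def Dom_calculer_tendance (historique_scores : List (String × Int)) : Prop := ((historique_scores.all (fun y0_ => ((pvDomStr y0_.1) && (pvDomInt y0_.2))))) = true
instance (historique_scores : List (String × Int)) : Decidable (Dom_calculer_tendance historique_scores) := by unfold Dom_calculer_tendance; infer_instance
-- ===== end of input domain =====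

-- B replaces A's two adjacent-pair all() scans by a sort-based characterisation
-- (strictly improving ⇔ values = sorted(set(values)); strictly degrading ⇔ values = its reverse).

-- ===== PORT A =====
-- valeurs = [score for _, score in historique_scores]; two all(...) scans over range(len-1).
def calculer_tendance (historique_scores : List (String × Int)) : String :=
  if historique_scores.length < 2 then "stable"
  else
    let valeurs := historique_scores.map (fun p => p.2)
    if (List.range (valeurs.length - 1)).all
        (fun i => decide (valeurs.getD i 0 < valeurs.getD (i + 1) 0)) then "amélioration"
    else if (List.range (valeurs.length - 1)).all
        (fun i => decide (valeurs.getD i 0 > valeurs.getD (i + 1) 0)) then "dégradation"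
    else "stable"

-- ===== PORT B =====
-- tri = sorted(set(valeurs)); compare valeurs with tri and with tri[::-1]
def calculer_tendance_alt (historique_scores : List (String × Int)) : String :=
  if historique_scores.length < 2 then "stable"
  else
    let valeurs := historique_scores.map (fun p => p.2)
    let tri := PySem.List.sorted (PySem.Set.ofList valeurs) (fun x => x) false
    if valeurs = tri then "amélioration"
    else if valeurs = (PySem.List.slice? tri none none (-1)).getD [] then "dégradation"
    else "stable"

-- ===== PRECONDITION & SPEC =====
def Spec_calculer_tendance (historique_scores : List (String × Int)) (out : String) : Prop := out = calculer_tendance_alt historique_scores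
instance (historique_scores : List (String × Int)) (out : String) : Decidable (Spec_calculer_tendance historique_scores out) := by unfold Spec_calculer_tendance; infer_instance

-- ===== CLAIM (what is proved, stated in full; the proofs are below) =====
def Claim_equal_calculer_tendance : Prop := ∀ (historique_scores : List (String × Int)), Dom_calculer_tendance historique_scores → Spec_calculer_tendance historique_scores (calculer_tendance historique_scores)

-- ===== LEMMAS AND PROOFS =====

-- adjacent-pair chain over a list of ints, parametric in the comparison
def chainR (r : Int → Int → Bool) : List Int → Bool
  | [] => true
  | [_] => true
  | x :: y :: t => r x y && chainR r (y :: t)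

theorem range_all_chain (r : Int → Int → Bool) (v : List Int) :
    (List.range (v.length - 1)).all (fun i => r (v.getD i 0) (v.getD (i + 1) 0))
      = chainR r v := by
  induction v with
  | nil => simp [chainR]
  | cons x w ih =>
      cases w with
      | nil => simp [chainR]
      | cons y t =>
          rw [show (x :: y :: t).length - 1 = ((y :: t).length - 1) + 1 by simp,
             List.range_succ_eq_map]
          simp only [List.all_cons, List.all_map, Function.comp_def,
            List.getD_cons_succ, List.getD_cons_zero] at ih ⊢
          rw [ih]
          simp [chainR]

theorem chainR_iff_pairwise (r : Int → Int → Prop) [DecidableRel r] [IsTrans Int r]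
    (v : List Int) :
    chainR (fun a b => decide (r a b)) v = true ↔ v.Pairwise r := by
  rw [← List.isChain_iff_pairwise]
  induction v with
  | nil => simp [chainR]
  | cons x w ih =>
      cases w with
      | nil => simp [chainR]
      | cons y t =>
          simp only [chainR, Bool.and_eq_true, decide_eq_true_eq,
            List.isChain_cons_cons] at ih ⊢
          rw [ih]

theorem range_all_chain_lt (v : List Int) :
    (List.range (v.length - 1)).all (fun i => decide (v.getD i 0 < v.getD (i + 1) 0))
      = chainR (fun a b => decide (a < b)) v := range_all_chain (fun a b => decide (a < b)) v

theorem range_all_chain_gt (v : List Int) :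
    (List.range (v.length - 1)).all (fun i => decide (v.getD i 0 > v.getD (i + 1) 0))
      = chainR (fun a b => decide (a > b)) v := range_all_chain (fun a b => decide (a > b)) v

theorem pairwise_lt_iff_eq_tri (v : List Int) :
    v.Pairwise (· < ·) ↔ v = PySem.List.sorted (PySem.Set.ofList v) (fun x => x) false := by
  constructor
  · intro h
    have hnd : v.Nodup := h.imp (fun {a b} hab => ne_of_lt hab)
    rw [PySem.Set.ofList_eq_self_of_nodup v hnd,
        PySem.List.sorted_eq_self_of_pairwise v (fun x => x)
          (h.imp (fun {a b} hab => le_of_lt hab))]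
  · intro h
    rw [h]
    exact PySem.List.sorted_ofList_pairwise_lt v

theorem pairwise_gt_iff_eq_tri_rev (v : List Int) :
    v.Pairwise (· > ·) ↔
      v = (PySem.List.sorted (PySem.Set.ofList v) (fun x => x) false).reverse := by
  constructor
  · intro h
    have hrev : v.reverse.Pairwise (· < ·) := by
      rw [List.pairwise_reverse]; exact h
    have hnd : v.Nodup := h.imp (fun {a b} hab => ne_of_gt hab)
    have hs : PySem.List.sorted v (fun x => x) = v.reverse :=
      PySem.List.sorted_eq_of_perm_of_pairwise_lt v v.reverse (fun x => x)
        (List.reverse_perm v) hrev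
    rw [PySem.Set.ofList_eq_self_of_nodup v hnd, hs, List.reverse_reverse]
  · intro h
    have : (PySem.List.sorted (PySem.Set.ofList v) (fun x => x) false).reverse.Pairwise (· > ·) := by
      rw [List.pairwise_reverse]
      exact (PySem.List.sorted_ofList_pairwise_lt v).imp (fun {a b} hab => hab)
    rw [h]; exact this

theorem calculer_tendance_spec_aux (h : List (String × Int)) :
    calculer_tendance h = calculer_tendance_alt h := by
  unfold calculer_tendance calculer_tendance_alt
  by_cases hl : h.length < 2
  · simp [hl]
  · simp only [hl, if_false]
    set v := h.map (fun p => p.2) with hv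
    set tri := PySem.List.sorted (PySem.Set.ofList v) (fun x => x) false with htri
    have e1 : ((List.range (v.length - 1)).all
        (fun i => decide (v.getD i 0 < v.getD (i + 1) 0))) = decide (v = tri) := by
      rw [range_all_chain_lt, Bool.eq_iff_iff, chainR_iff_pairwise (· < ·) v]
      simp [pairwise_lt_iff_eq_tri, htri]
    have e2 : ((List.range (v.length - 1)).all
        (fun i => decide (v.getD i 0 > v.getD (i + 1) 0))) = decide (v = tri.reverse) := by
      rw [range_all_chain_gt, Bool.eq_iff_iff, chainR_iff_pairwise (· > ·) v]
      simp [pairwise_gt_iff_eq_tri_rev, htri]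
    rw [e1, e2]
    simp [PySem.List.slice?_none_none_neg_one]

-- ===== VERDICT (by name: the statement is the Claim_ definition above) =====
theorem calculer_tendance_spec : Claim_equal_calculer_tendance := by
  intro h _
  unfold Spec_calculer_tendance
  exact calculer_tendance_spec_aux h
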